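-- pv_equiv track=rewrite | github.com/HeoYou/algorithm-python | 부스트캠프 1.py | solution
-- ===== SOURCE A (Python) =====
-- def solution(name):
--     answer = True
--     flag = True
--
--     for i in range(len(name)):
--         for j in range(len(name)):
--             if name[i] in name[j] and name.index(name[i]) != name.index(name[j]):
--                 return True
--
--     return False
-- ===== SOURCE B (Python) =====
-- def solution(name):
--     # On a string, name[i] and name[j] are single characters: the substring test
--     # holds only when they are equal, and equal characters share the same first
--     # occurrence, so name.index(name[i]) == name.index(name[j]) and A's branch
--     # can never fire.  The result is the closed form False.
--     return False
-- ===== Notes on version B (the rewrite author's own statement) =====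
-- stated objective: simpler
-- what changed: Replaces the nested index scan with the closed form False: single-character elements are substrings of each other only when equal, and equal characters have the same first-occurrence index, so A's branch never fires.
import Mathlib
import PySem

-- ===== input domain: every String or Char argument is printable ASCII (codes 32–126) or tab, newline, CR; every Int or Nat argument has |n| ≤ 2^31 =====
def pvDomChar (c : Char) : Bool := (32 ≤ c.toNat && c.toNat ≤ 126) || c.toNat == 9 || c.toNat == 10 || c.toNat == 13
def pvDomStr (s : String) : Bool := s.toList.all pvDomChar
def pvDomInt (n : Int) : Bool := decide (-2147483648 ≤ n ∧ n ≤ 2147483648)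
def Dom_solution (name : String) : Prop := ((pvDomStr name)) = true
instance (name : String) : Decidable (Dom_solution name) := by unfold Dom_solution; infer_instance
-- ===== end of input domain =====

-- B replaces the nested scan by the closed form False (proved: A's branch can never fire on a string).

-- ===== PORT A =====
-- literal port: for i in range(len(name)): for j in range(len(name)):
--   if name[i] in name[j] and name.index(name[i]) != name.index(name[j]): return True
-- return False.  (the `match` only makes the in-range indexing total; i,j are always in range)
def solution (name : String) : Bool :=
  (PySem.List.pyRange 0 (PySem.Str.len name) 1).any (fun i =>
    (PySem.List.pyRange 0 (PySem.Str.len name) 1).any (fun j =>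
      match PySem.Str.pyGet? name i, PySem.Str.pyGet? name j with
      | some ci, some cj =>
          PySem.Str.isIn (String.ofList [ci]) (String.ofList [cj]) &&
            decide (PySem.Str.find name (String.ofList [ci]) ≠ PySem.Str.find name (String.ofList [cj]))
      | _, _ => false))

-- ===== PORT B =====
def solution_alt (name : String) : Bool := false

-- ===== PRECONDITION & SPEC =====
def Spec_solution (name : String) (out : Bool) : Prop := out = solution_alt name
instance (name : String) (out : Bool) : Decidable (Spec_solution name out) := by unfold Spec_solution; infer_instance

-- ===== CLAIM (what is proved, stated in full; the proofs are below) =====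
def Claim_equal_solution : Prop := ∀ (name : String), Dom_solution name → Spec_solution name (solution name)

-- ===== LEMMAS AND PROOFS =====

-- a one-character string is a substring of another iff the characters are equal
theorem isIn_singleton_iff (a b : Char) :
    PySem.Str.isIn (String.ofList [a]) (String.ofList [b]) = true ↔ a = b := by
  rw [PySem.Str.isIn_iff_infix]
  constructor
  · intro h
    have h' : ([a] : List Char) <:+: [b] := by simpa using h
    simpa using h'.subset (List.mem_singleton.mpr rfl)
  · rintro rfl; exact List.infix_rfl


theorem solution_eq_false (name : String) : solution name = false := by
  unfold solution
  rw [List.any_eq_false]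
  intro i _
  simp only [Bool.not_eq_true]
  rw [List.any_eq_false]
  intro j _
  cases hci : PySem.Str.pyGet? name i with
  | none => simp
  | some ci =>
    cases hcj : PySem.Str.pyGet? name j with
    | none => simp
    | some cj =>
      by_cases h : ci = cj
      · subst h; simp
      · simp only [Bool.and_eq_true, not_and, decide_eq_true_eq]
        intro hin
        exact absurd ((isIn_singleton_iff ci cj).mp hin) h

-- ===== VERDICT (by name: the statement is the Claim_ definition above) =====
theorem solution_spec : Claim_equal_solution := by
  intro name _
  unfold Spec_solution solution_alt
  exact solution_eq_false name
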